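-- pv_equiv track=rewrite | github.com/ming-taro/baekjoon-online-judge | 프로그래머스/1/67256. ［카카오 인턴］ 키패드 누르기/［카카오 인턴］ 키패드 누르기.py | solution
-- ===== SOURCE A (Python) =====
-- def solution(numbers, hand):
--     answer = ''
--
--     phone = {1: [0, 0], 2:[0, 1], 3:[0, 2], 4:[1, 0], 5:[1, 1], 6:[1, 2], 7:[2, 0], 8:[2, 1], 9:[2, 2], 0:[3, 1]}
--     left = [3, 0]
--     right = [3, 2]
--
--     for number in numbers:
--         position = phone[number]
--
--         if(number == 1 or number == 4 or number == 7):
--             answer += 'L'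
--             left = position
--         elif(number == 3 or number == 6 or number == 9):
--             answer += 'R'
--             right = position
--         else:
--             right_distance = abs(position[0] - right[0]) + abs(position[1] - right[1])
--             left_distance = abs(position[0] - left[0]) + abs(position[1] - left[1])
--             if right_distance < left_distance or (right_distance == left_distance and hand == "right"):
--                 right = position
--                 answer += 'R'
--             else:
--                 left = position
--                 answer += 'L'
--
--
--     return answer
-- ===== SOURCE B (Python) =====
-- def solution(numbers, hand):
--     # finite-state automaton: precompute the full transition table over hand-position
--     # labels (0-9 keys, 10='*', 11='#'), then the scan is pure table lookups
--     def pos(k):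
--         if k == 0:
--             return (3, 1)
--         if k == 10:
--             return (3, 0)
--         if k == 11:
--             return (3, 2)
--         return divmod(k - 1, 3)
--
--     def trans(l, r, n):
--         row, col = pos(n)
--         if col == 0:
--             return ('L', n, r)
--         if col == 2:
--             return ('R', l, n)
--         lr, lc = pos(l)
--         rr, rc = pos(r)
--         rd = abs(row - rr) + abs(col - rc)
--         ld = abs(row - lr) + abs(col - lc)
--         if rd < ld or (rd == ld and hand == "right"):
--             return ('R', l, n)
--         return ('L', n, r)
--
--     table = [[[trans(l, r, n) for n in range(10)] for r in range(12)] for l in range(12)]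
--
--     out = []
--     l, r = 10, 11
--     for n in numbers:
--         ch, l, r = table[l][r][n]
--         out.append(ch)
--     return ''.join(out)
-- ===== Notes on version B (the rewrite author's own statement) =====
-- stated objective: alternative
-- what changed: B is a precomputed finite-state automaton: it builds the complete 12x12x10 transition table over hand-position labels (keys 0-9 plus the '*'/'#' start keys) once, so the scan over numbers is pure table lookups carrying key labels, instead of A's per-digit dict lookup, digit-set branching and Manhattan-distance computation inside the loop.
import Mathlib
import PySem

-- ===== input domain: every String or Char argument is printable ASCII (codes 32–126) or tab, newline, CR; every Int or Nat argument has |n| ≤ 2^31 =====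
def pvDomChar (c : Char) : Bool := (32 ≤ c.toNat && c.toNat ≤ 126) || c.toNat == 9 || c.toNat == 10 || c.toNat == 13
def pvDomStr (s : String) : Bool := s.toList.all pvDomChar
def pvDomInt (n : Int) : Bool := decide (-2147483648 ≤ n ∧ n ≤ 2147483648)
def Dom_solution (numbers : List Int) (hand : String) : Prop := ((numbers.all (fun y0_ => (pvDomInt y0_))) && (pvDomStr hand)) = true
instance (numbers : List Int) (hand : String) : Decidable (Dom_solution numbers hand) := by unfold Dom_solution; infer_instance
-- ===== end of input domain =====

set_option maxRecDepth 8000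


-- B replaces A's per-digit simulation (dict lookup + digit-set branches + distances in the
-- loop) by a precomputed 12x12x10 transition table over hand-position labels, walked by
-- pure table lookups; objective: alternative.

-- ===== PORT A =====
def phoneA : PySem.Dict Int (Int × Int) :=
  PySem.Dict.ofList [(1,(0,0)), (2,(0,1)), (3,(0,2)), (4,(1,0)), (5,(1,1)), (6,(1,2)),
                     (7,(2,0)), (8,(2,1)), (9,(2,2)), (0,(3,1))]

-- one iteration of A's loop; phone[number] raises KeyError for number ∉ 0..9 —
-- exactly those inputs are excluded by Pre_solution, so the dummy default is never used inside Pre_.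
def stepA (hand : String) (st : String × (Int × Int) × (Int × Int)) (number : Int) :
    String × (Int × Int) × (Int × Int) :=
  let position := (PySem.Dict.get? phoneA number).getD (0, 0)
  if number = 1 ∨ number = 4 ∨ number = 7 then
    (st.1 ++ "L", position, st.2.2)
  else if number = 3 ∨ number = 6 ∨ number = 9 then
    (st.1 ++ "R", st.2.1, position)
  else
    let right_distance := |position.1 - st.2.2.1| + |position.2 - st.2.2.2|
    let left_distance := |position.1 - st.2.1.1| + |position.2 - st.2.1.2|
    if right_distance < left_distance ∨ (right_distance = left_distance ∧ hand = "right") then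
      (st.1 ++ "R", st.2.1, position)
    else
      (st.1 ++ "L", position, st.2.2)

def solution (numbers : List Int) (hand : String) : String :=
  (numbers.foldl (stepA hand) ("", (3, 0), (3, 2))).1

-- ===== PORT B =====
-- coordinate of a hand-position label: keys 0..9, 10 = '*' (left start), 11 = '#' (right start)
def posB (k : Int) : Int × Int :=
  if k = 0 then (3, 1)
  else if k = 10 then (3, 0)
  else if k = 11 then (3, 2)
  else (PySem.Int.floordiv (k - 1) 3, PySem.Int.mod (k - 1) 3)

-- one automaton transition: (letter pressed, new left label, new right label)
def transB (hand : String) (l r n : Int) : String × Int × Int :=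
  let p := posB n
  if p.2 = 0 then ("L", n, r)
  else if p.2 = 2 then ("R", l, n)
  else
    let lp := posB l
    let rp := posB r
    let rd := |p.1 - rp.1| + |p.2 - rp.2|
    let ld := |p.1 - lp.1| + |p.2 - lp.2|
    if rd < ld ∨ (rd = ld ∧ hand = "right") then ("R", l, n) else ("L", n, r)

-- the full transition table, built once
def tableB (hand : String) : List (List (List (String × Int × Int))) :=
  (PySem.List.pyRange 0 12 1).map (fun l =>
    (PySem.List.pyRange 0 12 1).map (fun r =>
      (PySem.List.pyRange 0 10 1).map (fun n => transB hand l r n)))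

-- table[l][r][n]; out-of-range n (IndexError in Python) is excluded by Pre_solution,
-- so the defaults are never used inside Pre_
def stepB (tbl : List (List (List (String × Int × Int))))
    (st : List String × Int × Int) (n : Int) : List String × Int × Int :=
  let e := PySem.List.pyGetD
    (PySem.List.pyGetD (PySem.List.pyGetD tbl st.2.1 []) st.2.2 []) n ("L", 10, 11)
  (st.1 ++ [e.1], e.2.1, e.2.2)

def solution_alt (numbers : List Int) (hand : String) : String :=
  PySem.Str.join "" ((numbers.foldl (stepB (tableB hand)) ([], 10, 11)).1)

-- ===== PRECONDITION & SPEC =====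
-- Pre_ excludes exactly the inputs on which A raises KeyError (a digit outside 0..9).
def Pre_solution (numbers : List Int) (_hand : String) : Prop :=
  ∀ n ∈ numbers, 0 ≤ n ∧ n ≤ 9
instance (numbers : List Int) (hand : String) : Decidable (Pre_solution numbers hand) := by
  unfold Pre_solution; infer_instance
def pvWitness_solution : List Int × String := ([1, 3, 4, 5, 8, 2, 1, 4, 5, 9, 5, 0, 7], "right")

def Spec_solution (numbers : List Int) (hand : String) (out : String) : Prop := out = solution_alt numbers hand
instance (numbers : List Int) (hand : String) (out : String) : Decidable (Spec_solution numbers hand out) := by unfold Spec_solution; infer_instance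

-- ===== CLAIM (what is proved, stated in full; the proofs are below) =====
def Claim_equal_solution : Prop := ∀ (numbers : List Int) (hand : String), Dom_solution numbers hand → Pre_solution numbers hand → Spec_solution numbers hand (solution numbers hand)

-- ===== LEMMAS AND PROOFS =====

-- the table really is the transition function on in-range labels and digits
theorem table_lookup (hand : String) (l r n : Int)
    (hl0 : 0 ≤ l) (hl1 : l < 12) (hr0 : 0 ≤ r) (hr1 : r < 12) (hn0 : 0 ≤ n) (hn1 : n < 10) :
    PySem.List.pyGetD
      (PySem.List.pyGetD (PySem.List.pyGetD (tableB hand) l []) r []) n ("L", 10, 11)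
      = transB hand l r n := by
  unfold tableB
  rw [PySem.List.pyGetD_map_pyRange_of_nonneg _ 12 l _ hl0 hl1,
      PySem.List.pyGetD_map_pyRange_of_nonneg _ 12 r _ hr0 hr1,
      PySem.List.pyGetD_map_pyRange_of_nonneg _ 10 n _ hn0 hn1]

-- the new labels after a transition are either the old label or the pressed digit
theorem transB_labels (hand : String) (l r n : Int) :
    ((transB hand l r n).2.1 = l ∨ (transB hand l r n).2.1 = n) ∧
    ((transB hand l r n).2.2 = r ∨ (transB hand l r n).2.2 = n) := by
  unfold transB
  dsimp only
  split_ifs <;> simp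

-- for an in-range digit, A's step at the coordinates of the labels agrees with the transition
theorem step_agree (hand : String) (n : Int) (h1 : 0 ≤ n) (h2 : n ≤ 9)
    (s : String) (l r : Int) :
    stepA hand (s, posB l, posB r) n =
      (s ++ (transB hand l r n).1, posB (transB hand l r n).2.1, posB (transB hand l r n).2.2) := by
  interval_cases n
  · have hp : (PySem.Dict.get? phoneA 0).getD ((0:Int),(0:Int)) = ((3:Int),(1:Int)) := by decide
    have hq : posB (0:Int) = ((3:Int),(1:Int)) := by decide
    simp only [stepA, transB, hp, hq]
    norm_num
    split_ifs <;> simp [hq]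
  · rfl
  · have hp : (PySem.Dict.get? phoneA 2).getD ((0:Int),(0:Int)) = ((0:Int),(1:Int)) := by decide
    have hq : posB (2:Int) = ((0:Int),(1:Int)) := by decide
    simp only [stepA, transB, hp, hq]
    norm_num
    split_ifs <;> simp [hq]
  · rfl
  · rfl
  · have hp : (PySem.Dict.get? phoneA 5).getD ((0:Int),(0:Int)) = ((1:Int),(1:Int)) := by decide
    have hq : posB (5:Int) = ((1:Int),(1:Int)) := by decide
    simp only [stepA, transB, hp, hq]
    norm_num
    split_ifs <;> simp [hq]
  · rfl
  · rfl
  · have hp : (PySem.Dict.get? phoneA 8).getD ((0:Int),(0:Int)) = ((2:Int),(1:Int)) := by decide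
    have hq : posB (8:Int) = ((2:Int),(1:Int)) := by decide
    simp only [stepA, transB, hp, hq]
    norm_num
    split_ifs <;> simp [hq]
  · rfl

-- B's accumulator only ever grows at the tail, so the fold factors through the empty accumulator
theorem foldB_acc (tbl : List (List (List (String × Int × Int)))) (nums : List Int)
    (acc : List String) (l r : Int) :
    nums.foldl (stepB tbl) (acc, l, r) =
      (acc ++ (nums.foldl (stepB tbl) ([], l, r)).1, (nums.foldl (stepB tbl) ([], l, r)).2) := by
  induction nums generalizing acc l r with
  | nil => simp
  | cons n ns ih =>
    have hstep : ∀ a : List String, stepB tbl (a, l, r) n =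
        (a ++ (stepB tbl ([], l, r) n).1, (stepB tbl ([], l, r) n).2) := by
      intro a; unfold stepB; dsimp only; simp
    rcases h0 : stepB tbl ([], l, r) n with ⟨bs, bl, br⟩
    rw [List.foldl_cons, List.foldl_cons, hstep acc, h0]
    rw [ih (acc ++ bs) bl br, ih bs bl br]
    simp

theorem joinNilCons (a : List Char) (rest : List (List Char)) :
    PySem.Chars.join [] (a :: rest) = a ++ PySem.Chars.join [] rest := by
  cases rest <;>
    simp [PySem.Chars.join_nil, PySem.Chars.join_singleton, PySem.Chars.join_cons_cons]

theorem main_fold (hand : String) (nums : List Int) :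
    ∀ l r : Int, 0 ≤ l → l < 12 → 0 ≤ r → r < 12 → ∀ s : String,
    (∀ n ∈ nums, 0 ≤ n ∧ n ≤ 9) →
    ((nums.foldl (stepA hand) (s, posB l, posB r)).1).toList =
      s.toList ++ PySem.Chars.join []
        (((nums.foldl (stepB (tableB hand)) ([], l, r)).1).map String.toList) := by
  induction nums with
  | nil => intro l r _ _ _ _ s _; simp [PySem.Chars.join_nil]
  | cons n ns ih =>
    intro l r hl0 hl1 hr0 hr1 s hok
    have hn := hok n (by simp)
    rcases ht : transB hand l r n with ⟨ch, l', r'⟩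
    have hB1 : stepB (tableB hand) ([], l, r) n = ([ch], l', r') := by
      unfold stepB
      dsimp only
      rw [table_lookup hand l r n hl0 hl1 hr0 hr1 hn.1 (by omega), ht]
      simp
    have hlab := transB_labels hand l r n
    rw [ht] at hlab
    dsimp only at hlab
    have hl'0 : 0 ≤ l' := by rcases hlab.1 with h | h <;> omega
    have hl'1 : l' < 12 := by rcases hlab.1 with h | h <;> omega
    have hr'0 : 0 ≤ r' := by rcases hlab.2 with h | h <;> omega
    have hr'1 : r' < 12 := by rcases hlab.2 with h | h <;> omega
    have hA1 : stepA hand (s, posB l, posB r) n = (s ++ ch, posB l', posB r') := by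
      rw [step_agree hand n hn.1 hn.2 s l r, ht]
    simp only [List.foldl_cons, hA1, hB1]
    rw [foldB_acc (tableB hand) ns [ch] l' r']
    have hok' : ∀ m ∈ ns, 0 ≤ m ∧ m ≤ 9 := fun m hm => hok m (by simp [hm])
    rw [ih l' r' hl'0 hl'1 hr'0 hr'1 (s ++ ch) hok']
    simp only [List.singleton_append, List.map_cons, joinNilCons, String.toList_append,
      List.append_assoc]

-- ===== VERDICT (by name: the statement is the Claim_ definition above) =====
theorem solution_spec : Claim_equal_solution := by
  intro numbers hand _ hpre
  unfold Spec_solution solution solution_alt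
  apply String.toList_inj.mp
  have h := main_fold hand numbers 10 11 (by norm_num) (by norm_num) (by norm_num) (by norm_num) "" hpre
  rw [show posB 10 = (3, 0) from rfl, show posB 11 = (3, 2) from rfl] at h
  rw [show ("".toList : List Char) = [] from rfl, List.nil_append] at h
  rw [PySem.Str.toList_join, show ("".toList : List Char) = [] from rfl]
  exact h
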